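-- pv_equiv track=rewrite | github.com/danielkentwood/spindle | spindle/analytics/recorder.py | _window_token_counts
-- ===== SOURCE A (Python) =====
-- from typing import Iterable, Mapping, Sequence
--
-- def _window_token_counts(tokens: Sequence[int], window_size: int) -> list[int]:
--     if window_size <= 0 or not tokens:
--         return []
--     if len(tokens) < window_size:
--         return []
--     return [
--         sum(tokens[idx : idx + window_size])
--         for idx in range(0, len(tokens) - window_size + 1)
--     ]
-- ===== SOURCE B (Python) =====
-- from typing import Sequence
--
-- def _window_token_counts(tokens: Sequence[int], window_size: int) -> list[int]:
--     n = len(tokens)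
--     if window_size <= 0 or n < window_size:
--         return []
--     s = sum(tokens[0:window_size])
--     out = [s]
--     for i in range(window_size, n):
--         s = s + tokens[i] - tokens[i - window_size]
--         out.append(s)
--     return out
-- ===== Notes on version B (the rewrite author's own statement) =====
-- stated objective: faster
-- what changed: Replaces the per-index re-summation of each window with a single pass that maintains a running window sum, adding the entering element and subtracting the leaving one.
import Mathlib
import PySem

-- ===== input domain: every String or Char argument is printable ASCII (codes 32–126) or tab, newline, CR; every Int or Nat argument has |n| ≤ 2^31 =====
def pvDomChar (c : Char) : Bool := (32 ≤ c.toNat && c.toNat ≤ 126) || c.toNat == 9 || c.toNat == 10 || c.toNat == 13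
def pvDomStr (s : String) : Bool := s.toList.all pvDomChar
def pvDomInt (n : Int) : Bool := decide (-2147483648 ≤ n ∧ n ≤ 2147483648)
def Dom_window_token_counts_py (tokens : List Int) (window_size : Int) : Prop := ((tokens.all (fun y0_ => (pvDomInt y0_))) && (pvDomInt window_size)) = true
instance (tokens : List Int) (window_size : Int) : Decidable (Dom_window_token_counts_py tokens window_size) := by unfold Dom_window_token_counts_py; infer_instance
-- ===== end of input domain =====

-- B computes the same window sums in one pass with a running sum (add entering, subtract
-- leaving element) instead of re-summing every window; objective: faster (asymptotic).

-- ===== PORT A =====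
def window_token_counts_py (tokens : List Int) (window_size : Int) : List Int :=
  if window_size ≤ 0 ∨ tokens = [] then []
  else if (tokens.length : Int) < window_size then []
  else
    (PySem.List.pyRange 0 ((tokens.length : Int) - window_size + 1) 1).map
      (fun idx => (PySem.List.slice tokens (some idx) (some (idx + window_size))).sum)

-- ===== PORT B =====
def window_token_counts_py_alt (tokens : List Int) (window_size : Int) : List Int :=
  if window_size ≤ 0 ∨ (tokens.length : Int) < window_size then []
  else
    let s0 := (PySem.List.slice tokens (some 0) (some window_size)).sum
    ((PySem.List.pyRange window_size (tokens.length : Int) 1).foldl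
      (fun (st : Int × List Int) i =>
        let s := st.1 + PySem.List.pyGetD tokens i 0 - PySem.List.pyGetD tokens (i - window_size) 0
        (s, st.2 ++ [s]))
      (s0, [s0])).2

-- ===== PRECONDITION & SPEC =====
def Spec_window_token_counts_py (tokens : List Int) (window_size : Int) (out : List Int) : Prop := out = window_token_counts_py_alt tokens window_size
instance (tokens : List Int) (window_size : Int) (out : List Int) : Decidable (Spec_window_token_counts_py tokens window_size out) := by unfold Spec_window_token_counts_py; infer_instance

-- ===== CLAIM (what is proved, stated in full; the proofs are below) =====
def Claim_equal_window_token_counts_py : Prop := ∀ (tokens : List Int) (window_size : Int), Dom_window_token_counts_py tokens window_size → Spec_window_token_counts_py tokens window_size (window_token_counts_py tokens window_size)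

-- ===== LEMMAS AND PROOFS =====

-- the sum of the window starting at j
def pvWinSum (tokens : List Int) (w j : Nat) : Int := ((tokens.drop j).take w).sum

-- sliding identity: the window at j+1 is the window at j plus the entering minus the leaving element
lemma pv_slide (tokens : List Int) (w j : Nat) (hw : 1 ≤ w) (h : j + w < tokens.length) :
    pvWinSum tokens w (j + 1)
      = pvWinSum tokens w j + tokens.getD (j + w) 0 - tokens.getD j 0 := by
  obtain ⟨k, rfl⟩ : ∃ k, w = k + 1 := ⟨w - 1, by omega⟩
  have hj : j < tokens.length := by omega
  have hd : tokens.drop j = tokens[j] :: tokens.drop (j + 1) :=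
    List.drop_eq_getElem_cons hj
  have hidx : j + 1 + k < tokens.length := by omega
  have htk : (tokens.drop (j + 1)).take (k + 1)
      = (tokens.drop (j + 1)).take k ++ [tokens[j + 1 + k]] := by
    rw [List.take_add_one]
    have : (tokens.drop (j + 1))[k]? = some tokens[j + 1 + k] := by
      rw [List.getElem?_drop]
      exact List.getElem?_eq_getElem hidx
    simp [this]
  have hgd1 : tokens.getD (j + (k + 1)) 0 = tokens[j + 1 + k] := by
    rw [List.getD_eq_getElem _ _ (by omega)]
    congr 1
    omega
  have hgd2 : tokens.getD j 0 = tokens[j] := List.getD_eq_getElem _ _ hj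
  simp only [pvWinSum, hd, List.take_succ_cons, List.sum_cons, htk, List.sum_append,
    List.sum_cons, List.sum_nil, hgd1, hgd2]
  ring

-- invariant of B's fold: after processing range(w, m) the state is (window sum at m-w, all sums so far)
lemma pv_loop (tokens : List Int) (w : Nat) (hw : 1 ≤ w) (m : Nat)
    (hm1 : w ≤ m) (hm2 : m ≤ tokens.length) :
    ((PySem.List.pyRange (w : Int) (m : Int) 1).foldl
      (fun (st : Int × List Int) i =>
        let s := st.1 + PySem.List.pyGetD tokens i 0 - PySem.List.pyGetD tokens (i - (w : Int)) 0
        (s, st.2 ++ [s]))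
      (pvWinSum tokens w 0, [pvWinSum tokens w 0]))
    = (pvWinSum tokens w (m - w), (List.range (m - w + 1)).map (pvWinSum tokens w)) := by
  induction m, hm1 using Nat.le_induction with
  | base =>
      rw [PySem.List.pyRange_one_eq_nil (by omega)]
      simp
  | succ m hm ih =>
      have hmlt : m < tokens.length := by omega
      have hstep : PySem.List.pyRange (w : Int) ((m + 1 : Nat) : Int) 1
          = PySem.List.pyRange (w : Int) (m : Int) 1 ++ [(m : Int)] := by
        push_cast
        exact PySem.List.pyRange_one_succ_right (by exact_mod_cast hm)
      rw [hstep, List.foldl_append, ih (by omega)]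
      have hsub : (m : Int) - (w : Int) = ((m - w : Nat) : Int) := by omega
      have hgetm : PySem.List.pyGetD tokens (m : Int) 0 = tokens.getD m 0 :=
        PySem.List.pyGetD_natCast ..
      have hgetmw : PySem.List.pyGetD tokens ((m : Int) - (w : Int)) 0 = tokens.getD (m - w) 0 := by
        rw [hsub]; exact PySem.List.pyGetD_natCast ..
      have hslide : pvWinSum tokens w (m - w) + tokens.getD m 0 - tokens.getD (m - w) 0
          = pvWinSum tokens w (m + 1 - w) := by
        have := pv_slide tokens w (m - w) hw (by omega)
        have h1 : m - w + w = m := by omega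
        have h2 : m - w + 1 = m + 1 - w := by omega
        rw [h1, h2] at this
        omega
      simp only [List.foldl_cons, List.foldl_nil, hgetm, hgetmw]
      refine Prod.ext ?_ ?_
      · simpa using hslide
      · have hr : m + 1 - w + 1 = (m - w + 1) + 1 := by omega
        simp only [hr, List.range_succ, List.map_append, List.map_cons, List.map_nil]
        rw [show m - w + 1 = m + 1 - w from by omega, ← hslide]

-- A's comprehension equals the list of window sums
lemma pv_a_eq (tokens : List Int) (w : Nat) (hw : 1 ≤ w) (hlen : w ≤ tokens.length) :
    (PySem.List.pyRange 0 ((tokens.length : Int) - (w : Int) + 1) 1).map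
      (fun idx => (PySem.List.slice tokens (some idx) (some (idx + (w : Int)))).sum)
    = (List.range (tokens.length - w + 1)).map (pvWinSum tokens w) := by
  have hb : (tokens.length : Int) - (w : Int) + 1 = ((tokens.length - w + 1 : Nat) : Int) := by
    omega
  rw [hb, PySem.List.pyRange_one, List.map_map]
  have ht : ((((tokens.length - w + 1 : Nat) : Int)) - 0).toNat = tokens.length - w + 1 := by
    omega
  rw [ht]
  apply List.map_congr_left
  intro k _
  simp only [Function.comp, zero_add, PySem.List.slice_natCast_add, pvWinSum]

-- ===== VERDICT (by name: the statement is the Claim_ definition above) =====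
theorem window_token_counts_py_spec : Claim_equal_window_token_counts_py := by
  unfold Claim_equal_window_token_counts_py
  intro tokens window_size _
  unfold Spec_window_token_counts_py window_token_counts_py window_token_counts_py_alt
  by_cases hws : window_size ≤ 0
  · simp [hws]
  · by_cases hlen : (tokens.length : Int) < window_size
    · have hne : tokens = [] ∨ tokens ≠ [] := em _
      rcases hne with h | h
      · simp [hws, h]
      · simp [hws, hlen, h]
    · have hnil : tokens ≠ [] := by
        intro h
        apply hlen
        simp [h]
        omega
      simp only [hws, hnil, hlen, or_self, if_false]
      obtain ⟨w, rfl⟩ : ∃ w : Nat, window_size = (w : Int) :=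
        ⟨window_size.toNat, by omega⟩
      have hw : 1 ≤ w := by omega
      have hwn : w ≤ tokens.length := by omega
      have hs0 : (PySem.List.slice tokens (some 0) (some (w : Int))).sum = pvWinSum tokens w 0 := by
        have : PySem.List.slice tokens (some ((0 : Nat) : Int)) (some (((0 : Nat) : Int) + (w : Int)))
            = (tokens.drop 0).take w := PySem.List.slice_natCast_add ..
        simpa [pvWinSum] using this
      rw [pv_a_eq tokens w hw hwn]
      simp only [hs0]
      rw [pv_loop tokens w hw tokens.length hwn (le_refl _)]
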